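-- pv_equiv track=rewrite | github.com/ldsmoreira/neural-probabilistic-model-bengioatall | data_loader/data_loaders.py | generate_ngrams_with_masks
-- ===== SOURCE A (Python) =====
-- def generate_ngrams_with_masks(content, n):
--     """Generate n-grams and targets with masks."""
--     words = ["[BEG]"] * (n - 1) + content.split() + ["[END]"]
--     ngrams = []
--     for i in range(len(words) - n):
--         ngram = " ".join(words[i:i+n])
--         target = words[i+n]
--         ngrams.append((ngram, target))
--     return ngrams
-- ===== SOURCE B (Python) =====
-- def generate_ngrams_with_masks(content, n):
--     """Generate n-grams and targets with masks (sliding-window one-pass)."""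
--     words = ["[BEG]"] * (n - 1) + content.split() + ["[END]"]
--     window = words[:n]
--     ngrams = []
--     for w in words[n:]:
--         ngrams.append((" ".join(window), w))
--         window.append(w)
--         window.pop(0)
--     return ngrams
-- ===== Notes on version B (the rewrite author's own statement) =====
-- stated objective: alternative
-- what changed: Replaces the index loop that re-slices words[i:i+n] and indexes words[i+n] each step by a single pass over words[n:] that maintains a sliding window list incrementally (append new word, pop the oldest).
-- outside the precondition, e.g. on generate_ngrams_with_masks('a', -1): A returns [('a', '[END]'), ('', 'a'), ('', '[END]')], B returns [('a', '[END]')]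
import Mathlib
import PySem

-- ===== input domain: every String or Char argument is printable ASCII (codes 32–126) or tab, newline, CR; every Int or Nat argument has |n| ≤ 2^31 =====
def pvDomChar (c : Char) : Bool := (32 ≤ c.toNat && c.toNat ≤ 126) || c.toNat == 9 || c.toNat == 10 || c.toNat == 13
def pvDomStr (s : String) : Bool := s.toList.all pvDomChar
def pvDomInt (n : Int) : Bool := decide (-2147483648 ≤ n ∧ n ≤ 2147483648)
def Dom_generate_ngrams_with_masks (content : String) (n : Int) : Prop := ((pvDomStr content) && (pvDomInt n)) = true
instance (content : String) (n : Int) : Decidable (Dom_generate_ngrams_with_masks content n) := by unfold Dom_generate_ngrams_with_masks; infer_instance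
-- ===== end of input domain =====

-- B replaces A's index loop (re-slicing words[i:i+n] and indexing words[i+n] each step)
-- by one pass over words[n:] maintaining a sliding window incrementally (alternative; return value only).

-- ===== PORT A =====
def generate_ngrams_with_masks (content : String) (n : Int) : List (String × String) :=
  let words : List String :=
    List.replicate (n - 1).toNat "[BEG]" ++ PySem.Str.split₀ content ++ ["[END]"]
  (PySem.List.pyRange 0 ((words.length : Int) - n) 1).foldl
    (fun acc i =>
      acc ++ [(PySem.Str.join " " (PySem.List.slice words (some i) (some (i + n))),
               PySem.List.pyGetD words (i + n) "")]) []

-- ===== PORT B =====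
def generate_ngrams_with_masks_alt (content : String) (n : Int) : List (String × String) :=
  let words : List String :=
    List.replicate (n - 1).toNat "[BEG]" ++ PySem.Str.split₀ content ++ ["[END]"]
  ((PySem.List.slice words (some n) none).foldl
    (fun (st : List (String × String) × List String) w =>
      (st.1 ++ [(PySem.Str.join " " st.2, w)], (st.2 ++ [w]).tail))
    ([], PySem.List.slice words none (some n))).1

-- ===== PRECONDITION & SPEC =====
-- Pre_ restricts to the natural domain of an n-gram size, 0 ≤ n: for negative n A either raises
-- IndexError (n < -len(words)) or returns a list produced by negative-index slice/target wraparound,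
-- an artefact of A's implementation outside the function's purpose.
def Pre_generate_ngrams_with_masks (content : String) (n : Int) : Prop := 0 ≤ n
instance (content : String) (n : Int) : Decidable (Pre_generate_ngrams_with_masks content n) := by
  unfold Pre_generate_ngrams_with_masks; infer_instance

def pvWitness_generate_ngrams_with_masks : String × Int := ("a b", 2)

def Spec_generate_ngrams_with_masks (content : String) (n : Int) (out : List (String × String)) : Prop :=
  out = generate_ngrams_with_masks_alt content n
instance (content : String) (n : Int) (out : List (String × String)) :
    Decidable (Spec_generate_ngrams_with_masks content n out) := by
  unfold Spec_generate_ngrams_with_masks; infer_instance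

-- ===== CLAIM (what is proved, stated in full; the proofs are below) =====
def Claim_equal_generate_ngrams_with_masks : Prop :=
  ∀ (content : String) (n : Int), Dom_generate_ngrams_with_masks content n →
    Pre_generate_ngrams_with_masks content n →
    Spec_generate_ngrams_with_masks content n (generate_ngrams_with_masks content n)

-- ===== LEMMAS AND PROOFS =====

-- the common value both loops compute: one pair per remaining word, window slides by one
def specGo : List String → List String → List (String × String)
  | _, [] => []
  | win, w :: ws => (PySem.Str.join " " win, w) :: specGo ((win ++ [w]).tail) ws

theorem foldB_eq (rest : List String) : ∀ (acc : List (String × String)) (win : List String),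
    (rest.foldl
      (fun (st : List (String × String) × List String) w =>
        (st.1 ++ [(PySem.Str.join " " st.2, w)], (st.2 ++ [w]).tail)) (acc, win)).1
    = acc ++ specGo win rest := by
  induction rest with
  | nil => intro acc win; simp [specGo]
  | cons w ws ih => intro acc win; simp [List.foldl, ih, specGo]

theorem win_step (W : List String) (j m : ℕ) (h : j + m < W.length) :
    (((W.drop j).take m) ++ [W[j + m]]).tail = (W.drop (j + 1)).take m := by
  have h1 : (W.drop j).take m ++ [W[j + m]] = (W.drop j).take (m + 1) := by
    rw [List.take_add_one]
    have : (W.drop j)[m]? = some W[j + m] := by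
      rw [List.getElem?_drop, List.getElem?_eq_getElem h]
    simp [this]
  rw [h1, List.drop_eq_getElem_cons (show j < W.length by omega), List.take_succ_cons,
      List.tail_cons]

theorem key (W : List String) (m : ℕ) (j : ℕ) :
    (PySem.List.pyRange (j : Int) ((W.length : Int) - (m : Int)) 1).map
      (fun i => (PySem.Str.join " " (PySem.List.slice W (some i) (some (i + (m : Int)))),
                 PySem.List.pyGetD W (i + (m : Int)) ""))
    = specGo ((W.drop j).take m) (W.drop (j + m)) := by
  generalize hd : W.length - (j + m) = d
  induction d generalizing j with
  | zero =>
    have hdrop : List.drop (j + m) W = [] := List.drop_eq_nil_of_le (by omega)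
    rw [PySem.List.pyRange_one_eq_nil (by push_cast; omega), hdrop]
    simp [specGo]
  | succ d ih =>
    have h : j + m < W.length := by omega
    rw [PySem.List.pyRange_one_cons (by push_cast; omega)]
    rw [List.map_cons]
    rw [List.drop_eq_getElem_cons h]
    show ((PySem.Str.join " " (PySem.List.slice W (some (j:Int)) (some ((j:Int) + (m:Int)))),
           PySem.List.pyGetD W ((j:Int) + (m:Int)) "") :: _) = _
    rw [specGo]
    congr 1
    · rw [PySem.List.slice_natCast_add]
      have hc : ((j : Int) + (m : Int)) = ((j + m : ℕ) : Int) := by push_cast; ring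
      rw [hc, PySem.List.pyGetD_natCast, List.getD_eq_getElem?_getD,
          List.getElem?_eq_getElem h]
      simp
    · rw [win_step W j m h]
      have hstep : ((j : Int) + 1) = ((j + 1 : ℕ) : Int) := by push_cast; ring
      have hd' : W.length - (j + 1 + m) = d := by omega
      rw [hstep, ih (j + 1) hd', show j + 1 + m = j + m + 1 from by omega]

-- ===== VERDICT (by name: the statement is the Claim_ definition above) =====
theorem generate_ngrams_with_masks_spec : Claim_equal_generate_ngrams_with_masks := by
  intro content n _ hpre
  unfold Spec_generate_ngrams_with_masks
  obtain ⟨m, rfl⟩ : ∃ m : ℕ, n = (m : Int) := ⟨n.toNat, (Int.toNat_of_nonneg hpre).symm⟩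
  unfold generate_ngrams_with_masks generate_ngrams_with_masks_alt
  rw [PySem.List.foldl_append_singleton_eq_map, foldB_eq,
      PySem.List.slice_to_natCast, PySem.List.slice_from_natCast, List.nil_append]
  have h0 := key (List.replicate ((m : Int) - 1).toNat "[BEG]" ++ PySem.Str.split₀ content ++ ["[END]"]) m 0
  simpa using h0
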